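-- pv_equiv track=rewrite | github.com/eelectronn/combinatoricsOnWords | register.py | pcr2_next
-- ===== SOURCE A (Python) =====
-- def is_necklace(seq):
--     n = len(seq)
--     p = 1
--     for i in range(1, n):
--         if seq[i - p] > seq[i]:
--             return False
--         if seq[i - p] < seq[i]:
--             p = i + 1
--     if n % p != 0:
--         return False
--     return True
--
-- def pcr2_next(seq):
--     n = len(seq)
--     j = -1
--     for i in range(n):
--         if seq[i] == '1':
--             j = i
--     gemma = seq[j+1:] + '1' + seq[1:j+1]
--     if is_necklace(gemma):
--         return str(1 - int(seq[0], 10))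
--     return seq[0]
-- ===== SOURCE B (Python) =====
-- def pcr2_next(seq):
--     j = seq.rfind('1')
--     gemma = seq[j+1:] + '1' + seq[1:j+1]
--     if gemma == min(gemma[i:] + gemma[:i] for i in range(len(gemma))):
--         return str(1 - int(seq[0], 10))
--     return seq[0]
-- ===== Notes on version B (the rewrite author's own statement) =====
-- stated objective: simpler
-- what changed: B keeps pcr2_next's shape (last '1' found with str.rfind, same gemma) but replaces the Duval-style single-pass prenecklace test is_necklace by the definitional necklace test: gemma equals the lexicographic minimum of all its rotations.
import Mathlib
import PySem

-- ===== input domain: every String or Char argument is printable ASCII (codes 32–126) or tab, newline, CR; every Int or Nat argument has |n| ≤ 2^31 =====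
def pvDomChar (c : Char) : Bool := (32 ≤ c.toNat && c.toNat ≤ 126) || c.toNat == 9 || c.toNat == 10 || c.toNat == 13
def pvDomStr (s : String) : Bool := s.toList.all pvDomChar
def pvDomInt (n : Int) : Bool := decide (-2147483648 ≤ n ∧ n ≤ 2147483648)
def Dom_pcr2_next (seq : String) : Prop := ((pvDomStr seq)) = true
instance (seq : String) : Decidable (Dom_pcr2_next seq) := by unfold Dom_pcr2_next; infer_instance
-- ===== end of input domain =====

-- B replaces A's single-pass Duval-style is_necklace test by the definitional one
-- (gemma equals the lexicographic minimum of all its rotations); objective: simpler.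

-- ===== PORT A =====
-- is_necklace's loop: i runs over range(1, n); the early 'return False' is the none result.
-- The indices i - p and i are nonnegative Python ints with p ≤ i throughout, so Nat indexing is exact.
def pvNeckLoop (s : List Char) (n i p : Nat) : Option Nat :=
  if i < n then
    if s.getD (i - p) ' ' > s.getD i ' ' then none
    else if s.getD (i - p) ' ' < s.getD i ' ' then pvNeckLoop s n (i + 1) (i + 1)
    else pvNeckLoop s n (i + 1) p
  else some p
termination_by n - i

def pvIsNecklace (s : List Char) : Bool :=
  match pvNeckLoop s s.length 1 1 with
  | none => false
  | some p => s.length % p == 0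

def pcr2_next (seq : String) : String :=
  let s := seq.toList
  let n := s.length
  let j : Int := (PySem.List.pyRange 0 (n : Int) 1).foldl
      (fun j i => if PySem.List.pyGetD s i ' ' = '1' then i else j) (-1)
  let gemma := PySem.List.slice s (some (j + 1)) none ++ ['1'] ++
      PySem.List.slice s (some 1) (some (j + 1))
  if pvIsNecklace gemma then
    match PySem.List.pyGet? s 0 with
    | none => ""          -- seq[0] raises IndexError; excluded by Pre_
    | some c =>
      match PySem.Int.ofCharsBase? [c] 10 with
      | none => ""        -- int(seq[0], 10) raises ValueError; excluded by Pre_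
      | some d => String.ofList (PySem.Int.toChars (1 - d))
  else
    match PySem.List.pyGet? s 0 with
    | none => ""          -- seq[0] raises IndexError; excluded by Pre_
    | some c => String.ofList [c]

-- ===== PORT B =====
def pcr2_next_alt (seq : String) : String :=
  let s := seq.toList
  let j : Int := PySem.Chars.rfind s ['1']
  let gemma := PySem.List.slice s (some (j + 1)) none ++ ['1'] ++
      PySem.List.slice s (some 1) (some (j + 1))
  let rotations := (PySem.List.pyRange 0 (gemma.length : Int) 1).map
      (fun i => PySem.List.slice gemma (some i) none ++ PySem.List.slice gemma none (some i))
  if some gemma = PySem.List.min? rotations (fun x => x) then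
    match PySem.List.pyGet? s 0 with
    | none => ""          -- seq[0] raises IndexError; excluded by Pre_
    | some c =>
      match PySem.Int.ofCharsBase? [c] 10 with
      | none => ""        -- int(seq[0], 10) raises ValueError; excluded by Pre_
      | some d => String.ofList (PySem.Int.toChars (1 - d))
  else
    match PySem.List.pyGet? s 0 with
    | none => ""          -- seq[0] raises IndexError; excluded by Pre_
    | some c => String.ofList [c]

-- ===== PRECONDITION & SPEC =====
-- one rotation of a word
def pvRot (g : List Char) (i : Nat) : List Char := g.drop i ++ g.take i
-- g is (lexicographically) minimal among its rotations, i.e. a necklace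
def pvMinRot (g : List Char) : Prop := ∀ i < g.length, ¬ (pvRot g i < g)
-- the word both programs build and test
def pvGemmaOf (s : List Char) : List Char :=
  PySem.List.slice s (some (PySem.Chars.rfind s ['1'] + 1)) none ++ ['1'] ++
    PySem.List.slice s (some 1) (some (PySem.Chars.rfind s ['1'] + 1))

-- Pre_ excludes exactly the inputs where A raises: the empty string (seq[0] is an
-- IndexError) and strings whose gemma is a necklace while seq[0] is not a decimal
-- digit (there int(seq[0], 10) is a ValueError).
def Pre_pcr2_next (seq : String) : Prop :=
  seq.toList ≠ [] ∧
    (pvMinRot (pvGemmaOf seq.toList) →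
      (PySem.Int.ofCharsBase? (seq.toList.take 1) 10).isSome = true)
instance (seq : String) : Decidable (Pre_pcr2_next seq) := by
  unfold Pre_pcr2_next; unfold pvMinRot; infer_instance

def pvWitness_pcr2_next : String := "01"

def Spec_pcr2_next (seq : String) (out : String) : Prop := out = pcr2_next_alt seq
instance (seq : String) (out : String) : Decidable (Spec_pcr2_next seq out) := by
  unfold Spec_pcr2_next; infer_instance

-- ===== CLAIM (what is proved, stated in full; the proofs are below) =====
def Claim_equal_pcr2_next : Prop :=
  ∀ (seq : String), Dom_pcr2_next seq → Pre_pcr2_next seq → Spec_pcr2_next seq (pcr2_next seq)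

-- ===== LEMMAS AND PROOFS =====

-- g has period p on the index interval [p, i)
def pvPer (g : List Char) (p i : Nat) : Prop :=
  ∀ j, p ≤ j → j < i → g.getD j ' ' = g.getD (j - p) ' '

-- u is strictly smaller than its suffix starting at j, witnessed by a character position
def pvSufLt (u : List Char) (j : Nat) : Prop :=
  ∃ t, t + j < u.length ∧ (∀ m, m < t → u.getD m ' ' = u.getD (j + m) ' ') ∧
    u.getD t ' ' < u.getD (j + t) ' '

-- u is a Lyndon word (strictly smaller than each of its proper suffixes)
def pvLyndon (u : List Char) : Prop := ∀ j, 0 < j → j < u.length → pvSufLt u j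

theorem pv_take_getD (g : List Char) (p m : Nat) (h : m < p) :
    (g.take p).getD m ' ' = g.getD m ' ' := by
  simp [List.getD_eq_getElem?_getD, h]

theorem pv_lex_intro (a b : List Char) (t : Nat) (hta : t < a.length) (htb : t < b.length)
    (heq : ∀ m, m < t → a.getD m ' ' = b.getD m ' ')
    (hlt : a.getD t ' ' < b.getD t ' ') : a < b := by
  show List.Lex (· < ·) a b
  induction t generalizing a b with
  | zero =>
    match a, b, hta, htb with
    | x :: a', y :: b', _, _ =>
      apply List.Lex.rel
      simpa using hlt
  | succ t ih =>
    match a, b, hta, htb with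
    | x :: a', y :: b', hta, htb =>
      have h0 : x = y := by simpa using heq 0 (Nat.succ_pos t)
      subst h0
      exact List.Lex.cons (ih a' b' (by simpa using hta) (by simpa using htb)
        (fun m hm => by simpa using heq (m + 1) (by omega)) (by simpa using hlt))

theorem pv_eq_of_getD (a b : List Char) (hlen : a.length = b.length)
    (he : ∀ m, m < a.length → a.getD m ' ' = b.getD m ' ') : a = b := by
  apply List.ext_getElem hlen
  intro m h1 h2
  have := he m h1
  rwa [List.getD_eq_getElem _ _ h1, List.getD_eq_getElem _ _ h2] at this

theorem pv_per_add_mul {g : List Char} {p i : Nat} (hper : pvPer g p i) :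
    ∀ d j, j + d * p < i → g.getD (j + d * p) ' ' = g.getD j ' ' := by
  intro d
  induction d with
  | zero => simp
  | succ d ih =>
    intro j h
    have harith : j + (d + 1) * p = (j + d * p) + p := by ring
    rw [harith]
    have h2 : (j + d * p) + p < i := by omega
    have h3 := hper ((j + d * p) + p) (by omega) h2
    rw [h3, Nat.add_sub_cancel]
    exact ih j (by omega)

theorem pv_rot_length (g : List Char) (i : Nat) : (pvRot g i).length = g.length := by
  simp [pvRot]; omega

theorem pv_rot_getD_lo (g : List Char) (i m : Nat) (hm : m < g.length - i) :
    (pvRot g i).getD m ' ' = g.getD (i + m) ' ' := by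
  have h1 : m < (g.drop i).length := by simp; omega
  rw [pvRot, List.getD_eq_getElem?_getD, List.getElem?_append_left h1,
    List.getElem?_drop, List.getD_eq_getElem?_getD]

theorem pv_rot_getD_hi (g : List Char) (i m : Nat) (hi : i ≤ g.length)
    (h1 : g.length - i ≤ m) (hm : m < g.length) :
    (pvRot g i).getD m ' ' = g.getD (m - (g.length - i)) ' ' := by
  have h2 : (g.drop i).length ≤ m := by simp; omega
  rw [pvRot, List.getD_eq_getElem?_getD, List.getElem?_append_right h2]
  have h3 : m - (g.drop i).length = m - (g.length - i) := by simp
  rw [h3, List.getElem?_take, if_pos (by omega), List.getD_eq_getElem?_getD]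

theorem pv_lyndon_head_le {u : List Char} (h : pvLyndon u) :
    ∀ j, j < u.length → u.getD 0 ' ' ≤ u.getD j ' ' := by
  intro j hj
  rcases Nat.eq_zero_or_pos j with rfl | hj0
  · exact le_refl _
  · obtain ⟨t, ht, heq, hlt⟩ := h j hj0 hj
    rcases Nat.eq_zero_or_pos t with rfl | ht0
    · simpa using le_of_lt hlt
    · simpa using le_of_eq (heq 0 ht0)

-- Duval's extension lemma: a strict increase at i extends the prefix to a Lyndon word.
theorem pv_duval_ext {g : List Char} {p i : Nat} (hp : 1 ≤ p) (hpi : p ≤ i)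
    (hin : i < g.length) (hper : pvPer g p i) (hlyn : pvLyndon (g.take p))
    (hlt : g.getD (i - p) ' ' < g.getD i ' ') : pvLyndon (g.take (i + 1)) := by
  have hul : (g.take p).length = p := by simp; omega
  have hw : ∀ m, m ≤ i → (g.take (i + 1)).getD m ' ' = g.getD m ' ' :=
    fun m hm => pv_take_getD g (i + 1) m (by omega)
  have hwl : (g.take (i + 1)).length = i + 1 := by simp; omega
  have hu : ∀ m, m < p → (g.take p).getD m ' ' = g.getD m ' ' :=
    fun m hm => pv_take_getD g p m hm
  have hqr := Nat.div_add_mod i p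
  have hr : i % p < p := Nat.mod_lt _ hp
  have ha1 : 1 ≤ i / p := (Nat.one_le_div_iff hp).mpr hpi
  obtain ⟨q', hq'⟩ : ∃ q', i / p = q' + 1 := ⟨i / p - 1, by omega⟩
  have hqp : (q' + 1) * p = q' * p + p := by ring
  have hi' : i = q' * p + p + i % p := by
    rw [hq'] at hqr; rw [Nat.mul_comm] at hqr; omega
  have hcr : g.getD (i - p) ' ' = g.getD (i % p) ' ' := by
    have h := pv_per_add_mul hper q' (i % p) (by omega)
    rw [show i - p = i % p + q' * p from by omega]
    exact h
  rw [hcr] at hlt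
  intro jj hj0 hjlen
  rw [hwl] at hjlen
  have hjle : jj ≤ i := by omega
  unfold pvSufLt
  rcases eq_or_lt_of_le hjle with hji | hji
  · -- jj = i : the suffix is the single new character
    refine ⟨0, by omega, fun m hm => by omega, ?_⟩
    rw [hw 0 (by omega), hw (jj + 0) (by omega)]
    have h0r : g.getD 0 ' ' ≤ g.getD (i % p) ' ' := by
      have h := pv_lyndon_head_le hlyn (i % p) (by rw [hul]; omega)
      rwa [hu 0 (by omega), hu (i % p) hr] at h
    have : jj + 0 = i := by omega
    rw [this]
    exact lt_of_le_of_lt h0r hlt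
  · -- jj < i
    have hab := Nat.div_add_mod jj p
    have hb : jj % p < p := Nat.mod_lt _ hp
    set a := jj / p with hadef
    set b := jj % p with hbdef
    have hjab : jj = a * p + b := by rw [Nat.mul_comm] at hab; omega
    have haq : a ≤ q' + 1 := by
      by_contra hc
      have h1 : (q' + 2) * p ≤ a * p := Nat.mul_le_mul_right p (by omega)
      have h2 : (q' + 2) * p = q' * p + p + p := by ring
      omega
    rcases Nat.eq_zero_or_pos b with hb0 | hb0
    · -- the suffix starts at a block boundary
      refine ⟨i - jj, by omega, ?_, ?_⟩
      · intro m hm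
        rw [hw m (by omega), hw (jj + m) (by omega)]
        have h := pv_per_add_mul hper a m (by omega)
        rw [show jj + m = m + a * p from by omega]
        exact h.symm
      · rw [hw (i - jj) (by omega), hw (jj + (i - jj)) (by omega),
          show jj + (i - jj) = i from by omega]
        obtain ⟨e, he⟩ : ∃ e, a + e = q' + 1 := ⟨q' + 1 - a, by omega⟩
        have h4 : a * p + e * p = (q' + 1) * p := by rw [← Nat.add_mul, he]
        have h5 := pv_per_add_mul hper e (i % p) (by omega)
        rw [show i - jj = i % p + e * p from by omega]
        rw [h5]
        exact hlt
    · -- the suffix starts inside a block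
      obtain ⟨t0, ht0, heq0, hlt0⟩ := hlyn b hb0 (by rw [hul]; omega)
      rw [hul] at ht0
      rcases Nat.lt_or_ge (jj + t0) i with hcase | hcase
      · refine ⟨t0, by omega, ?_, ?_⟩
        · intro m hm
          rw [hw m (by omega), hw (jj + m) (by omega)]
          have e1 : g.getD m ' ' = g.getD (b + m) ' ' := by
            have h := heq0 m hm
            rwa [hu m (by omega), hu (b + m) (by omega)] at h
          have e2 := pv_per_add_mul hper a (b + m) (by omega)
          rw [show jj + m = (b + m) + a * p from by omega, e2]
          exact e1
        · rw [hw t0 (by omega), hw (jj + t0) (by omega)]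
          have e2 := pv_per_add_mul hper a (b + t0) (by omega)
          rw [show jj + t0 = (b + t0) + a * p from by omega, e2]
          have h := hlt0
          rwa [hu t0 (by omega), hu (b + t0) (by omega)] at h
      · have hij : i - jj ≤ t0 := by omega
        obtain ⟨e, he⟩ : ∃ e, a + e = q' + 1 := ⟨q' + 1 - a, by omega⟩
        have h4 : a * p + e * p = (q' + 1) * p := by rw [← Nat.add_mul, he]
        have hbe : b + (i - jj) = e * p + i % p := by omega
        have he0 : e = 0 := by
          rcases Nat.eq_zero_or_pos e with h | h
          · exact h
          · exfalso
            have h6 : p ≤ e * p := Nat.le_mul_of_pos_left p h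
            omega
        have hep : e * p = 0 := by rw [he0]; ring
        have hbr : b + (i - jj) = i % p := by omega
        refine ⟨i - jj, by omega, ?_, ?_⟩
        · intro m hm
          rw [hw m (by omega), hw (jj + m) (by omega)]
          have e1 : g.getD m ' ' = g.getD (b + m) ' ' := by
            have h := heq0 m (by omega)
            rwa [hu m (by omega), hu (b + m) (by omega)] at h
          have e2 := pv_per_add_mul hper a (b + m) (by omega)
          rw [show jj + m = (b + m) + a * p from by omega, e2]
          exact e1
        · rw [hw (i - jj) (by omega), hw (jj + (i - jj)) (by omega),
            show jj + (i - jj) = i from by omega]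
          have hfin : g.getD (i - jj) ' ' ≤ g.getD (i % p) ' ' := by
            rcases eq_or_lt_of_le hij with h | h
            · have hl := hlt0
              rw [hu t0 (by omega), hu (b + t0) (by omega)] at hl
              rw [h]
              rw [show b + t0 = i % p from by omega] at hl
              exact le_of_lt hl
            · have hl := heq0 (i - jj) h
              rw [hu (i - jj) (by omega), hu (b + (i - jj)) (by omega), hbr] at hl
              exact le_of_eq hl
          exact lt_of_le_of_lt hfin hlt

-- acceptance: full period p dividing n with a Lyndon prefix makes g minimal among rotations
theorem pv_accept {g : List Char} {p : Nat} (hp : 1 ≤ p) (hpn : p ≤ g.length)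
    (hper : pvPer g p g.length) (hlyn : pvLyndon (g.take p))
    (hdvd : g.length % p = 0) : pvMinRot g := by
  intro i hi
  have hul : (g.take p).length = p := by simp; omega
  have hu : ∀ m, m < p → (g.take p).getD m ' ' = g.getD m ' ' :=
    fun m hm => pv_take_getD g p m hm
  obtain ⟨K, hK⟩ := Nat.dvd_of_mod_eq_zero hdvd
  have hK' : g.length = K * p := by rw [hK]; ring
  have hab := Nat.div_add_mod i p
  have hb : i % p < p := Nat.mod_lt _ hp
  set a := i / p with hadef
  set b := i % p with hbdef
  have hiab : i = a * p + b := by rw [Nat.mul_comm] at hab; omega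
  have haK : a < K := by
    have h1 : a * p < K * p := by omega
    exact Nat.lt_of_mul_lt_mul_right h1
  rcases Nat.eq_zero_or_pos b with hb0 | hb0
  · -- the rotation is g itself
    have heq : pvRot g i = g := by
      apply pv_eq_of_getD _ _ (pv_rot_length g i)
      intro m hm
      rw [pv_rot_length] at hm
      by_cases hmlo : m < g.length - i
      · rw [pv_rot_getD_lo g i m hmlo]
        have h := pv_per_add_mul hper a m (by omega)
        rw [show i + m = m + a * p from by omega]
        exact h
      · rw [pv_rot_getD_hi g i m (by omega) (by omega) hm]
        obtain ⟨e, he⟩ : ∃ e, a + e = K := ⟨K - a, by omega⟩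
        have h4 : a * p + e * p = K * p := by rw [← Nat.add_mul, he]
        have hlenmi : g.length - i = e * p := by omega
        have h7 : m - (g.length - i) + e * p = m := by omega
        have h5 := pv_per_add_mul hper e (m - (g.length - i)) (by rw [h7]; exact hm)
        rw [h7] at h5
        exact h5.symm
    rw [heq]
    exact lt_irrefl g
  · -- g is strictly below the rotation
    obtain ⟨t0, ht0, heq0, hlt0⟩ := hlyn b hb0 (by rw [hul]; omega)
    rw [hul] at ht0
    have hni : p - b ≤ g.length - i := by
      have h1 : (a + 1) * p ≤ K * p := Nat.mul_le_mul_right p (by omega)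
      have h2 : (a + 1) * p = a * p + p := by ring
      omega
    have hglt : g < pvRot g i := by
      apply pv_lex_intro g (pvRot g i) t0 (by omega)
      · rw [pv_rot_length]; omega
      · intro m hm
        rw [pv_rot_getD_lo g i m (by omega)]
        have e1 : g.getD m ' ' = g.getD (b + m) ' ' := by
          have h := heq0 m hm
          rwa [hu m (by omega), hu (b + m) (by omega)] at h
        have e2 := pv_per_add_mul hper a (b + m) (by omega)
        rw [show i + m = (b + m) + a * p from by omega, e2]
        exact e1
      · rw [pv_rot_getD_lo g i t0 (by omega)]
        have e2 := pv_per_add_mul hper a (b + t0) (by omega)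
        rw [show i + t0 = (b + t0) + a * p from by omega, e2]
        have h := hlt0
        rwa [hu t0 (by omega), hu (b + t0) (by omega)] at h
    exact fun hc => absurd hglt (lt_asymm hc)

-- rejection at the end of the loop: the final p does not divide n
theorem pv_reject {g : List Char} {p : Nat} (hp : 1 ≤ p) (hpn : p ≤ g.length)
    (hper : pvPer g p g.length) (hlyn : pvLyndon (g.take p))
    (hnd : g.length % p ≠ 0) : ¬ pvMinRot g := by
  intro hmin
  have hul : (g.take p).length = p := by simp; omega
  have hu : ∀ m, m < p → (g.take p).getD m ' ' = g.getD m ' ' :=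
    fun m hm => pv_take_getD g p m hm
  have hab := Nat.div_add_mod g.length p
  have hr : g.length % p < p := Nat.mod_lt _ hp
  have hr0 : 0 < g.length % p := Nat.pos_of_ne_zero hnd
  set Q := g.length / p with hQdef
  set r := g.length % p with hrdef
  have hQ1 : 1 ≤ Q := (Nat.one_le_div_iff hp).mpr hpn
  have hnQ : g.length = Q * p + r := by rw [Nat.mul_comm] at hab; omega
  have hQp : p ≤ Q * p := Nat.le_mul_of_pos_left p hQ1
  obtain ⟨t0, ht0, heq0, hlt0⟩ := hlyn r hr0 (by rw [hul]; omega)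
  rw [hul] at ht0
  apply hmin (Q * p) (by omega)
  apply pv_lex_intro (pvRot g (Q * p)) g (r + t0)
  · rw [pv_rot_length]; omega
  · omega
  · intro m hm
    by_cases hmr : m < r
    · rw [pv_rot_getD_lo g (Q * p) m (by omega)]
      have h := pv_per_add_mul hper Q m (by omega)
      rw [show Q * p + m = m + Q * p from by omega]
      exact h
    · rw [pv_rot_getD_hi g (Q * p) m (by omega) (by omega) (by omega)]
      rw [show g.length - Q * p = r from by omega]
      have e1 : g.getD (m - r) ' ' = g.getD m ' ' := by
        have h := heq0 (m - r) (by omega)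
        rw [hu (m - r) (by omega), hu (r + (m - r)) (by omega)] at h
        rw [show r + (m - r) = m from by omega] at h
        exact h
      exact e1
  · rw [pv_rot_getD_hi g (Q * p) (r + t0) (by omega) (by omega) (by omega)]
    rw [show g.length - Q * p = r from by omega, show r + t0 - r = t0 from by omega]
    have h := hlt0
    rwa [hu t0 (by omega), hu (r + t0) (by omega)] at h

-- rejection inside the loop: a strict decrease at i
theorem pv_fail {g : List Char} {p i : Nat} (hp : 1 ≤ p) (hpi : p ≤ i)
    (hin : i < g.length) (hper : pvPer g p i) (_hlyn : pvLyndon (g.take p))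
    (hfail : g.getD i ' ' < g.getD (i - p) ' ') : ¬ pvMinRot g := by
  intro hmin
  have hul : (g.take p).length = p := by simp; omega
  have hab := Nat.div_add_mod i p
  have hb : i % p < p := Nat.mod_lt _ hp
  have ha1 : 1 ≤ i / p := (Nat.one_le_div_iff hp).mpr hpi
  set a := i / p with hadef
  set r := i % p with hrdef
  have hiab : i = a * p + r := by rw [Nat.mul_comm] at hab; omega
  obtain ⟨a', ha'⟩ : ∃ a', a = a' + 1 := ⟨a - 1, by omega⟩
  have hap : (a' + 1) * p = a' * p + p := by ring
  have hiab2 : i = a' * p + p + r := by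
    rw [ha'] at hiab; omega
  have hcr : g.getD (i - p) ' ' = g.getD r ' ' := by
    have h := pv_per_add_mul hper a' r (by omega)
    rw [show i - p = r + a' * p from by omega]
    exact h
  rw [hcr] at hfail
  have hp0 : 0 < a * p := Nat.mul_pos (by omega) (by omega)
  apply hmin (a * p) (by omega)
  apply pv_lex_intro (pvRot g (a * p)) g r
  · rw [pv_rot_length]; omega
  · omega
  · intro m hm
    rw [pv_rot_getD_lo g (a * p) m (by omega)]
    have h := pv_per_add_mul hper a m (by omega)
    rw [show a * p + m = m + a * p from by omega]
    exact h
  · rw [pv_rot_getD_lo g (a * p) r (by omega)]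
    rw [show a * p + r = i from by omega]
    exact hfail

theorem pv_loop_main {g : List Char} : ∀ k i p, g.length - i = k → 1 ≤ p → p ≤ i →
    i ≤ g.length → pvPer g p i → pvLyndon (g.take p) →
    (pvNeckLoop g g.length i p = none → ¬ pvMinRot g) ∧
    (∀ p', pvNeckLoop g g.length i p = some p' →
      1 ≤ p' ∧ p' ≤ g.length ∧ pvPer g p' g.length ∧ pvLyndon (g.take p')) := by
  intro k
  induction k using Nat.strong_induction_on with
  | _ k ih =>
    intro i p hk hp hpi hin hper hlyn
    rw [pvNeckLoop]
    by_cases hi : i < g.length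
    · rw [if_pos hi]
      by_cases h1 : g.getD (i - p) ' ' > g.getD i ' '
      · rw [if_pos h1]
        constructor
        · intro _
          exact pv_fail hp hpi hi hper hlyn h1
        · intro p' hcontra
          simp at hcontra
      · rw [if_neg h1]
        by_cases h2 : g.getD (i - p) ' ' < g.getD i ' '
        · rw [if_pos h2]
          exact ih (g.length - (i + 1)) (by omega) (i + 1) (i + 1) rfl (by omega)
            (le_refl _) (by omega) (fun j hj1 hj2 => by omega)
            (pv_duval_ext hp hpi hi hper hlyn h2)
        · rw [if_neg h2]
          have heq : g.getD (i - p) ' ' = g.getD i ' ' := le_antisymm (not_lt.mp h1) (not_lt.mp h2)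
          apply ih (g.length - (i + 1)) (by omega) (i + 1) p rfl hp (by omega) (by omega)
          · intro j hj1 hj2
            rcases Nat.lt_or_ge j i with hj | hj
            · exact hper j hj1 hj
            · have : j = i := by omega
              rw [this]
              exact heq.symm
          · exact hlyn
    · rw [if_neg hi]
      have hieq : i = g.length := by omega
      constructor
      · intro hcontra
        simp at hcontra
      · intro p' hp'
        have : p = p' := by simpa using hp'
        subst this
        rw [hieq] at hper
        exact ⟨hp, by omega, hper, hlyn⟩

theorem pv_isNecklace_iff (g : List Char) : pvIsNecklace g = true ↔ pvMinRot g := by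
  by_cases hn : g.length = 0
  · have hg : g = [] := List.length_eq_zero_iff.mp hn
    subst hg
    constructor
    · intro _ i hi
      simp at hi
    · intro _
      unfold pvIsNecklace
      rw [pvNeckLoop]
      simp
  · have hmain := pv_loop_main (g := g) (g.length - 1) 1 1 rfl (le_refl _) (le_refl _)
      (by omega) (fun j h1 h2 => by omega)
      (by
        intro j hj0 hjl
        exfalso
        have : (g.take 1).length ≤ 1 := by simp
        omega)
    unfold pvIsNecklace
    cases hl : pvNeckLoop g g.length 1 1 with
    | none =>
      simp only [Bool.false_eq_true, false_iff]
      exact hmain.1 hl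
    | some p' =>
      obtain ⟨h1, h2, h3, h4⟩ := hmain.2 p' hl
      change (g.length % p' == 0) = true ↔ pvMinRot g
      by_cases hd : g.length % p' = 0
      · simp only [hd, beq_self_eq_true, true_iff]
        exact pv_accept h1 h2 h3 h4 hd
      · have hbeq : (g.length % p' == 0) = false := by simp [hd]
        rw [hbeq]
        simp only [Bool.false_eq_true, false_iff]
        exact pv_reject h1 h2 h3 h4 hd

theorem pv_rotations_eq (g : List Char) :
    (PySem.List.pyRange 0 (g.length : Int) 1).map
      (fun i => PySem.List.slice g (some i) none ++ PySem.List.slice g none (some i)) =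
    (List.range g.length).map (pvRot g) := by
  rw [PySem.List.pyRange_one]
  rw [List.map_map]
  simp only [Int.sub_zero, Int.toNat_natCast]
  apply List.map_congr_left
  intro k hk
  simp only [Function.comp_apply, Int.zero_add]
  rw [PySem.List.slice_from_natCast, PySem.List.slice_to_natCast]
  rfl

theorem pv_min_iff (g : List Char) (hg : 0 < g.length) :
    (some g = PySem.List.min? ((List.range g.length).map (pvRot g)) (fun x => x)) ↔
      pvMinRot g := by
  have hgmem : g ∈ (List.range g.length).map (pvRot g) := by
    apply List.mem_map.mpr
    exact ⟨0, List.mem_range.mpr hg, by simp [pvRot]⟩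
  have hbr : PySem.List.min? ((List.range g.length).map (pvRot g)) (fun x : List Char => x) =
      @PySem.List.min? (List Char) (List Char) List.instLinearOrder.toLT LinearOrder.toDecidableLT
        ((List.range g.length).map (pvRot g)) (fun x => x) := by congr 1
  constructor
  · intro hmin i hi hcon
    have hmem : pvRot g i ∈ (List.range g.length).map (pvRot g) :=
      List.mem_map.mpr ⟨i, List.mem_range.mpr hi, rfl⟩
    have hmin' : @PySem.List.min? (List Char) (List Char) List.instLinearOrder.toLT
        LinearOrder.toDecidableLT ((List.range g.length).map (pvRot g)) (fun x => x) = some g := by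
      rw [← hbr]; exact hmin.symm
    have hle : g ≤ pvRot g i := PySem.List.min?_isMin hmin' (pvRot g i) hmem
    exact absurd hcon (not_lt.mpr hle)
  · intro hmin
    cases hm : PySem.List.min? ((List.range g.length).map (pvRot g)) (fun x => x) with
    | none =>
      rw [PySem.List.min?_eq_none_iff] at hm
      simp only [List.map_eq_nil_iff, List.range_eq_nil] at hm
      omega
    | some m =>
      obtain ⟨i, hi, rfl⟩ := List.mem_map.mp (PySem.List.min?_mem hm)
      have h1 : ¬ (pvRot g i < g) := hmin i (List.mem_range.mp hi)
      have hm' : @PySem.List.min? (List Char) (List Char) List.instLinearOrder.toLT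
          LinearOrder.toDecidableLT ((List.range g.length).map (pvRot g)) (fun x => x) =
          some (pvRot g i) := by
        rw [← hbr]; exact hm
      have h2 : pvRot g i ≤ g := PySem.List.min?_isMin hm' g hgmem
      rw [le_antisymm h2 (not_lt.mp h1)]

theorem pv_go_succ (s sub : List Char) (j : Nat) :
    PySem.Chars.rfind.go s sub (j + 1) =
      if sub.isPrefixOf (List.drop (j + 1) s) then ((j + 1 : Nat) : Int)
      else PySem.Chars.rfind.go s sub j := rfl

theorem pv_go_zero (s sub : List Char) :
    PySem.Chars.rfind.go s sub 0 = if sub.isPrefixOf s then 0 else -1 := rfl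

theorem pv_rfind_eq (s : List Char) :
    (PySem.List.pyRange 0 (s.length : Int) 1).foldl
      (fun j i => if PySem.List.pyGetD s i ' ' = '1' then i else j) (-1) =
    PySem.Chars.rfind s ['1'] := by
  have hpref : ∀ k, k < s.length → (['1'].isPrefixOf (s.drop k)) = (s.getD k ' ' == '1') := by
    intro k hk
    rw [List.drop_eq_getElem_cons hk]
    simp [List.isPrefixOf, BEq.comm, List.getD_eq_getElem?_getD, List.getElem?_eq_getElem hk]
  have hJsucc : ∀ (n : Nat),
      (PySem.List.pyRange 0 ((n : Int) + 1) 1).foldl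
        (fun j i => if PySem.List.pyGetD s i ' ' = '1' then i else j) (-1) =
      if s.getD n ' ' = '1' then (n : Int)
      else (PySem.List.pyRange 0 (n : Int) 1).foldl
        (fun j i => if PySem.List.pyGetD s i ' ' = '1' then i else j) (-1) := by
    intro n
    rw [PySem.List.pyRange_one_succ_right (a := 0) (b := (n : Int)) (by omega)]
    rw [List.foldl_append]
    simp [PySem.List.pyGetD_natCast]
  have hmain : ∀ k, k < s.length →
      (PySem.List.pyRange 0 ((k : Int) + 1) 1).foldl
        (fun j i => if PySem.List.pyGetD s i ' ' = '1' then i else j) (-1) =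
      PySem.Chars.rfind.go s ['1'] k := by
    intro k
    induction k with
    | zero =>
      intro hk
      rw [pv_go_zero]
      have h := hpref 0 hk
      rw [List.drop_zero] at h
      rw [hJsucc 0]
      rw [show ((0 : Nat) : Int) = 0 from rfl, PySem.List.pyRange_zero]
      simp only [Int.toNat_zero, List.range_zero, List.map_nil, List.foldl_nil]
      rw [h]
      by_cases h1 : s.getD 0 ' ' = '1'
      · rw [if_pos h1, if_pos (by simpa using h1)]
      · rw [if_neg h1, if_neg (by simpa using h1)]
    | succ k ihk =>
      intro hk
      rw [pv_go_succ]
      have h := hpref (k + 1) hk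
      have hJ := hJsucc (k + 1)
      push_cast at hJ ⊢
      rw [hJ]
      have hI := ihk (by omega)
      push_cast at hI
      rw [hI, h]
      by_cases h1 : s.getD (k + 1) ' ' = '1'
      · rw [if_pos h1, if_pos (by simpa using h1)]
      · rw [if_neg h1, if_neg (by simpa using h1)]
  cases hs : s.length with
  | zero =>
    have hnil : s = [] := List.length_eq_zero_iff.mp hs
    subst hnil
    simp [PySem.Chars.rfind, pv_go_zero, PySem.List.pyRange_one_eq_nil, List.isPrefixOf]
  | succ m =>
    unfold PySem.Chars.rfind
    rw [hs, pv_go_succ]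
    have hdrop : List.drop (m + 1) s = [] := List.drop_eq_nil_of_le (by omega)
    rw [hdrop]
    rw [show (['1'].isPrefixOf ([] : List Char)) = false from rfl]
    rw [if_neg (by simp)]
    have hI := hmain m (by omega)
    push_cast at hI ⊢
    rw [← hI]

-- ===== VERDICT (by name: the statement is the Claim_ definition above) =====
theorem pcr2_next_spec : Claim_equal_pcr2_next := by
  intro seq hdom hpre
  simp only [Spec_pcr2_next, pcr2_next, pcr2_next_alt]
  rw [pv_rfind_eq seq.toList]
  set s := seq.toList
  set j : Int := PySem.Chars.rfind s ['1'] with hj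
  set gemma := PySem.List.slice s (some (j + 1)) none ++ ['1'] ++
      PySem.List.slice s (some 1) (some (j + 1)) with hg
  have hglen : 0 < gemma.length := by
    rw [hg]
    simp [List.length_append]
  have hcond : pvIsNecklace gemma = true ↔ (some gemma = PySem.List.min?
      ((PySem.List.pyRange 0 (gemma.length : Int) 1).map
        (fun i => PySem.List.slice gemma (some i) none ++ PySem.List.slice gemma none (some i)))
      (fun x => x)) := by
    rw [pv_rotations_eq gemma, pv_isNecklace_iff gemma, pv_min_iff gemma hglen]
  by_cases hm : (some gemma = PySem.List.min?
      ((PySem.List.pyRange 0 (gemma.length : Int) 1).map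
        (fun i => PySem.List.slice gemma (some i) none ++ PySem.List.slice gemma none (some i)))
      (fun x => x))
  · rw [if_pos (hcond.mpr hm), if_pos hm]
  · rw [if_neg (fun hc => hm (hcond.mp hc)), if_neg hm]
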